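-- pv_equiv track=rewrite | github.com/XSafeAI/XSafeClaw | src/xsafeclaw/path_protection.py | _non_option_args
-- ===== SOURCE A (Python) =====
-- def _strip_wrapping_quotes(value: str) -> str:
--     text = value.strip()
--     if len(text) >= 2 and text[0] == text[-1] and text[0] in {'"', "'"}:
--         return text[1:-1]
--     return text
--
-- def _non_option_args(args: list[str]) -> list[str]:
--     values: list[str] = []
--     passthrough = False
--     for arg in args:
--         if arg == "--":
--             passthrough = True
--             continue
--         if not passthrough and arg.startswith("-") and arg != "-":
--             continue
--         values.append(_strip_wrapping_quotes(arg))
--     return values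
-- ===== SOURCE B (Python) =====
-- def _strip_wrapping_quotes(value: str) -> str:
--     text = value.strip()
--     if len(text) >= 2 and text[0] == text[-1] and text[0] in {'"', "'"}:
--         return text[1:-1]
--     return text
--
-- def _non_option_args(args: list[str]) -> list[str]:
--     if "--" in args:
--         i = args.index("--")
--         prefix, suffix = args[:i], args[i + 1:]
--     else:
--         prefix, suffix = args, []
--     kept = [a for a in prefix if not (a.startswith("-") and a != "-")]
--     kept += [a for a in suffix if a != "--"]
--     return [_strip_wrapping_quotes(a) for a in kept]
-- ===== Notes on version B (the rewrite author's own statement) =====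
-- stated objective: alternative
-- what changed: Replaces the single flag-driven scan with an index-then-partition structure: find the first '--', split into prefix and suffix, filter each with its own shaped pass (option-skipping vs '--'-dropping), then map the quote stripper over the kept args.
import Mathlib
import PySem

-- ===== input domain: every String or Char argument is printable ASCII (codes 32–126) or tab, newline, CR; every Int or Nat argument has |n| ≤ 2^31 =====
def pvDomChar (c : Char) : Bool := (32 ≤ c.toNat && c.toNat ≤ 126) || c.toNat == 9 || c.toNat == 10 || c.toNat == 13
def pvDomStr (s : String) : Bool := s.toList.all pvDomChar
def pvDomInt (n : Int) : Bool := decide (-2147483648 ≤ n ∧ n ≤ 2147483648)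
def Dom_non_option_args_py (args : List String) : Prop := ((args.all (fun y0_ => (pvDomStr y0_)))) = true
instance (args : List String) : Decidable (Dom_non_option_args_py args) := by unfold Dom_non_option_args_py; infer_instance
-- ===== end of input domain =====

-- B replaces A's flag-driven single scan by split-at-first-'--' then two shaped filter passes; same cost (objective: alternative).

-- ===== PORT A =====
-- shared helper: both Pythons contain the identical _strip_wrapping_quotes
def stripWrap (value : String) : String :=
  let text := PySem.Str.strip value
  if 2 ≤ PySem.Str.len text ∧
     PySem.Str.pyGet? text 0 = PySem.Str.pyGet? text (-1) ∧
     (PySem.Str.pyGet? text 0 = some '"' ∨ PySem.Str.pyGet? text 0 = some '\'') then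
    PySem.Str.slice text (some 1) (some (-1))
  else text

def nonOptLoop : List String → List String → Bool → List String
  | [], values, _ => values
  | arg :: rest, values, passthrough =>
    if arg = "--" then nonOptLoop rest values true
    else if passthrough = false ∧ PySem.Str.startswith arg "-" = true ∧ arg ≠ "-" then
      nonOptLoop rest values passthrough
    else nonOptLoop rest (values ++ [stripWrap arg]) passthrough

def non_option_args_py (args : List String) : List String := nonOptLoop args [] false

-- ===== PORT B =====
def non_option_args_py_alt (args : List String) : List String :=
  let ps : List String × List String :=
    match PySem.List.index? args "--" with
    | some i => (PySem.List.slice args none (some (i : Int)),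
                 PySem.List.slice args (some ((i : Int) + 1)) none)
    | none => (args, [])
  let kept := ps.1.filter (fun a => !(PySem.Str.startswith a "-" && a != "-"))
            ++ ps.2.filter (fun a => a != "--")
  kept.map stripWrap

-- ===== PRECONDITION & SPEC =====
def Spec_non_option_args_py (args : List String) (out : List String) : Prop := out = non_option_args_py_alt args
instance (args : List String) (out : List String) : Decidable (Spec_non_option_args_py args out) := by unfold Spec_non_option_args_py; infer_instance

-- ===== CLAIM (what is proved, stated in full; the proofs are below) =====
def Claim_equal_non_option_args_py : Prop := ∀ (args : List String), Dom_non_option_args_py args → Spec_non_option_args_py args (non_option_args_py args)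

-- ===== LEMMAS AND PROOFS =====
lemma alt_nil : non_option_args_py_alt [] = [] := by
  simp [non_option_args_py_alt, PySem.List.index?]

lemma alt_cons_dd (rest : List String) :
    non_option_args_py_alt ("--" :: rest)
      = (rest.filter (fun a => a != "--")).map stripWrap := by
  simp only [non_option_args_py_alt, PySem.List.index?_cons_self]
  norm_num [PySem.List.slice_to, PySem.List.slice_from]

lemma alt_cons_ne (arg : String) (rest : List String) (h : arg ≠ "--") :
    non_option_args_py_alt (arg :: rest)
      = (if PySem.Str.startswith arg "-" = true ∧ arg ≠ "-" then [] else [stripWrap arg])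
        ++ non_option_args_py_alt rest := by
  have h1 : PySem.List.index? (arg :: rest) "--"
      = (PySem.List.index? rest "--").map (fun x => x + 1) :=
    PySem.List.index?_cons_of_ne rest h
  cases hi : PySem.List.index? rest "--" with
  | none =>
      simp only [non_option_args_py_alt, h1, hi, Option.map_none]
      simp [List.filter_cons]
      split_ifs <;> simp_all
  | some i =>
      have hs1 : PySem.List.slice (arg :: rest) none (some (((i + 1 : Nat)) : Int))
          = arg :: List.take i rest := by
        rw [PySem.List.slice_to_natCast, List.take_succ_cons]
      have hs2 : PySem.List.slice (arg :: rest) (some ((((i + 1 : Nat)) : Int) + 1)) none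
          = PySem.List.slice rest (some ((i : Int) + 1)) none := by
        have e2 : (((i + 1 : Nat)) : Int) + 1 = (((i + 2 : Nat)) : Int) := by push_cast; ring
        have e3 : ((i : Int) + 1) = (((i + 1 : Nat)) : Int) := by push_cast; ring
        rw [e2, e3, PySem.List.slice_from_natCast, PySem.List.slice_from_natCast,
          List.drop_succ_cons]
      simp only [non_option_args_py_alt, h1, hi, Option.map_some, hs1, hs2,
        PySem.List.slice_to_natCast]
      simp [List.filter_cons]
      split_ifs <;> simp_all

lemma loop_true (xs : List String) (acc : List String) :
    nonOptLoop xs acc true = acc ++ (xs.filter (fun a => a != "--")).map stripWrap := by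
  induction xs generalizing acc with
  | nil => simp [nonOptLoop]
  | cons arg rest ih =>
      by_cases h : arg = "--"
      · subst h; simp [nonOptLoop, ih]
      · simp [nonOptLoop, h, ih]

lemma loop_false (xs : List String) (acc : List String) :
    nonOptLoop xs acc false = acc ++ non_option_args_py_alt xs := by
  induction xs generalizing acc with
  | nil => simp [nonOptLoop, alt_nil]
  | cons arg rest ih =>
      by_cases h : arg = "--"
      · subst h
        simp [nonOptLoop, loop_true, alt_cons_dd]
      · rw [alt_cons_ne arg rest h]
        simp only [nonOptLoop, if_neg h]
        by_cases hc : PySem.Str.startswith arg "-" = true ∧ arg ≠ "-"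
        · rw [if_pos ⟨trivial, hc.1, hc.2⟩, if_pos hc, ih]
          simp
        · rw [if_neg (by tauto), if_neg hc, ih]
          simp

-- ===== VERDICT (by name: the statement is the Claim_ definition above) =====
theorem non_option_args_py_spec : Claim_equal_non_option_args_py := by
  intro args _
  unfold Spec_non_option_args_py non_option_args_py
  simpa using loop_false args []
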